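-- pv_equiv track=rewrite | github.com/rowansci/steamroll | tests/test_steamroll.py | parse_comment_line
-- ===== SOURCE A (Python) =====
-- from typing import Any
--
-- def parse_comment_line(comment: str) -> dict[str, Any]:
--     """Parse the comment line of an XYZ file."""
--     data: dict[str, Any] = {}
--     for kv in comment.strip(";").split(";"):
--         try:
--             key, value = kv.split(":", 1)
--             data[key.strip()] = value.strip()
--         except ValueError:
--             continue
--     return data
-- ===== SOURCE B (Python) =====
-- def parse_comment_line(comment: str) -> dict[str, str]:
--     """Parse the comment line of an XYZ file (single-pass character scan)."""
--     data: dict[str, str] = {}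
--     key: list[str] = []
--     value: list[str] = []
--     seen_colon = False
--     for ch in comment + ";":
--         if ch == ";":
--             if seen_colon:
--                 data["".join(key).strip()] = "".join(value).strip()
--             key, value, seen_colon = [], [], False
--         elif ch == ":" and not seen_colon:
--             seen_colon = True
--         elif seen_colon:
--             value.append(ch)
--         else:
--             key.append(ch)
--     return data
-- ===== Notes on version B (the rewrite author's own statement) =====
-- stated objective: alternative
-- what changed: Replaced the multi-pass strip/split/split parsing with a single left-to-right character scan: a state machine with key and value accumulators and a seen-colon flag that never materialises intermediate segment lists.
import Mathlib
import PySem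

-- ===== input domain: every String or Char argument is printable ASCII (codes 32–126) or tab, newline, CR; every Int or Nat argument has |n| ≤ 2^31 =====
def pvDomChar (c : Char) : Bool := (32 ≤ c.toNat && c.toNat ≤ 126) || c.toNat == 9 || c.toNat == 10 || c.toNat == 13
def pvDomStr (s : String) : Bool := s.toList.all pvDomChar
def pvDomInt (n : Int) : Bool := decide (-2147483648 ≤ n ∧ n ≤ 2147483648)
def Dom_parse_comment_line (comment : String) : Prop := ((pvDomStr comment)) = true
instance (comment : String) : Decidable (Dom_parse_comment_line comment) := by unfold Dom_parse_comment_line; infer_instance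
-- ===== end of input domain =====

-- B replaces A's strip/split/split parsing with a single-pass character state machine; alternative structure, same result.


-- ===== PORT A =====
-- for kv in comment.strip(";").split(";"): try key, value = kv.split(":", 1); data[key.strip()] = value.strip(); except ValueError: continue
def parse_comment_line (comment : String) : List (String × String) :=
  let segs := (PySem.Str.split? (PySem.Str.stripChars comment ";") ";").getD []
  (segs.foldl (fun (d : PySem.Dict String String) kv =>
      match PySem.Str.splitMax? kv ":" 1 with
      | some [key, value] => d.insert (PySem.Str.strip key) (PySem.Str.strip value)
      | _ => d)
    (PySem.Dict.mk [])).items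

-- ===== PORT B =====
-- the state machine of Source B: key/value accumulators, seen-colon flag, scanning comment + ";"
def pvAltLoop (l : List Char) (key value : List Char) (seen : Bool) (d : PySem.Dict String String) : PySem.Dict String String :=
  match l with
  | [] => d
  | c :: rest =>
    if c = ';' then
      pvAltLoop rest [] [] false
        (if seen then d.insert (String.ofList (PySem.Chars.strip key)) (String.ofList (PySem.Chars.strip value)) else d)
    else if c = ':' ∧ seen = false then pvAltLoop rest key value true d
    else if seen then pvAltLoop rest key (value ++ [c]) seen d
    else pvAltLoop rest (key ++ [c]) value seen d

def parse_comment_line_alt (comment : String) : List (String × String) :=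
  (pvAltLoop (comment.toList ++ [';']) [] [] false (PySem.Dict.mk [])).items

-- ===== PRECONDITION & SPEC =====
def Spec_parse_comment_line (comment : String) (out : List (String × String)) : Prop := out = parse_comment_line_alt comment
instance (comment : String) (out : List (String × String)) : Decidable (Spec_parse_comment_line comment out) := by unfold Spec_parse_comment_line; infer_instance

-- ===== CLAIM (what is proved, stated in full; the proofs are below) =====
def Claim_equal_parse_comment_line : Prop := ∀ (comment : String), Dom_parse_comment_line comment → Spec_parse_comment_line comment (parse_comment_line comment)

-- ===== LEMMAS AND PROOFS =====

-- proof-side model of Python's split(";") on char lists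
def pvSplit : List Char → List (List Char)
  | [] => [[]]
  | c :: r => if c = ';' then [] :: pvSplit r else (pvSplit r).modifyHead (c :: ·)

-- the effect of one segment on the dict (shared characterisation of both ports)
def pvStep (d : PySem.Dict String String) (seg : List Char) : PySem.Dict String String :=
  if ':' ∈ seg then
    d.insert (String.ofList (PySem.Chars.strip (seg.takeWhile (· ≠ ':'))))
             (String.ofList (PySem.Chars.strip ((seg.dropWhile (· ≠ ':')).drop 1)))
  else d

theorem pvSplit_ne_nil (l : List Char) : pvSplit l ≠ [] := by
  induction l with
  | nil => simp [pvSplit]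
  | cons c r ih =>
    simp only [pvSplit]
    split
    · simp
    · cases hr : pvSplit r with
      | nil => exact absurd hr ih
      | cons a t => simp

theorem splitOn_go_eq (fuel : Nat) (l cur : List Char) (acc : List (List Char))
    (h : l.length ≤ fuel) :
    PySem.Chars.splitOn.go [';'] fuel l cur acc
      = acc.reverse ++ (pvSplit l).modifyHead (cur.reverse ++ ·) := by
  induction fuel generalizing l cur acc with
  | zero =>
    have hl : l = [] := List.eq_nil_of_length_eq_zero (Nat.le_zero.mp h)
    subst hl
    rw [PySem.Chars.splitOn.go]
    simp [pvSplit]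
  | succ fuel ih =>
    cases l with
    | nil =>
      rw [PySem.Chars.splitOn.go]
      all_goals simp [pvSplit]
    | cons c rest =>
      rw [PySem.Chars.splitOn.go]
      by_cases hc : c = ';'
      · subst hc
        have hp : [';'].isPrefixOf (';' :: rest) = true := by simp [List.isPrefixOf]
        simp only [hp, if_pos, List.length_cons, List.length_nil, Nat.zero_add,
          List.drop_succ_cons, List.drop_zero]
        rw [ih rest [] _ (by simpa using Nat.succ_le_succ_iff.mp h)]
        simp [pvSplit]
        cases pvSplit rest <;> simp
      · have hp : [';'].isPrefixOf (c :: rest) = false := by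
          simp [List.isPrefixOf]; exact fun hcc => hc hcc.symm
        simp only [hp]
        rw [ih rest (c :: cur) _ (by simpa using Nat.succ_le_succ_iff.mp h)]
        have hcs : (c = ';') = False := by simp [hc]
        simp only [pvSplit, hcs, if_false]
        cases hr : pvSplit rest with
        | nil => exact absurd hr (pvSplit_ne_nil rest)
        | cons a t => simp

theorem splitOn_eq_pvSplit (cs : List Char) : PySem.Chars.splitOn cs [';'] = pvSplit cs := by
  rw [PySem.Chars.splitOn, splitOn_go_eq _ _ _ _ (by omega)]
  cases hr : pvSplit cs with
  | nil => exact absurd hr (pvSplit_ne_nil cs)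
  | cons a t => simp

theorem splitOnMax_go_zero (fuel : Nat) (l cur : List Char) (acc : List (List Char)) :
    PySem.Chars.splitOnMax.go [':'] fuel 0 l cur acc = acc.reverse ++ [cur.reverse ++ l] := by
  induction fuel generalizing l cur acc with
  | zero => rw [PySem.Chars.splitOnMax.go]; simp
  | succ fuel ih =>
    cases l with
    | nil => rw [PySem.Chars.splitOnMax.go]; all_goals simp
    | cons c rest => rw [PySem.Chars.splitOnMax.go]; simp

theorem splitOnMax_go_one (fuel : Nat) (l cur : List Char) (acc : List (List Char))
    (h : l.length ≤ fuel) :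
    PySem.Chars.splitOnMax.go [':'] fuel 1 l cur acc
      = acc.reverse ++ (if ':' ∈ l then
          [cur.reverse ++ l.takeWhile (· ≠ ':'), (l.dropWhile (· ≠ ':')).drop 1]
        else [cur.reverse ++ l]) := by
  induction fuel generalizing l cur acc with
  | zero =>
    have hl : l = [] := List.eq_nil_of_length_eq_zero (Nat.le_zero.mp h)
    subst hl
    rw [PySem.Chars.splitOnMax.go]
    simp
  | succ fuel ih =>
    cases l with
    | nil => rw [PySem.Chars.splitOnMax.go]; all_goals simp
    | cons c rest =>
      rw [PySem.Chars.splitOnMax.go]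
      by_cases hc : c = ':'
      · subst hc
        have hp : [':'].isPrefixOf (':' :: rest) = true := by simp [List.isPrefixOf]
        simp only [hp, if_pos, List.length_singleton, List.drop_succ_cons, List.drop_zero,
          if_neg (by omega : ¬ (1 : Nat) = 0)]
        rw [splitOnMax_go_zero]
        simp [List.takeWhile, List.dropWhile]
      · have hp : [':'].isPrefixOf (c :: rest) = false := by
          simp [List.isPrefixOf]; exact fun hcc => hc hcc.symm
        simp only [hp, if_neg (by omega : ¬ (1 : Nat) = 0), Bool.false_eq_true, if_false]
        rw [ih rest (c :: cur) _ (by simpa using Nat.succ_le_succ_iff.mp h)]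
        have hcs : (· ≠ ':') c = true := by simp [hc]
        by_cases hm : ':' ∈ rest
        · simp [hm, hc]
        · have hmm : (':' ∈ (c :: rest)) = False := by
            simp [hm]; exact fun hcc => hc hcc.symm
          simp [hm, hmm]

theorem splitOnMax_one (l : List Char) :
    PySem.Chars.splitOnMax l [':'] 1
      = if ':' ∈ l then [l.takeWhile (· ≠ ':'), (l.dropWhile (· ≠ ':')).drop 1] else [l] := by
  rw [PySem.Chars.splitOnMax]
  rw [if_neg (by omega)]
  have h1 : (1 : Int).toNat = 1 := rfl
  rw [h1, splitOnMax_go_one _ _ _ _ (by omega)]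
  simp

theorem afold_eq_pvStep (d : PySem.Dict String String) (seg : List Char) :
    (match PySem.Str.splitMax? (String.ofList seg) ":" 1 with
      | some [key, value] => d.insert (PySem.Str.strip key) (PySem.Str.strip value)
      | _ => d) = pvStep d seg := by
  rw [PySem.Str.splitMax?]
  have hts : (String.ofList seg).toList = seg := by simp
  rw [hts]
  rw [PySem.Chars.splitMax?]
  rw [if_neg (by decide)]
  have : (":" : String).toList = [':'] := rfl
  rw [this, splitOnMax_one]
  by_cases hm : ':' ∈ seg
  · simp only [hm, if_pos, Option.map_some, List.map_cons, List.map_nil]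
    rw [pvStep, if_pos hm]
    simp [PySem.Str.strip]
  · simp only [hm, if_false, Option.map_some, List.map_cons, List.map_nil]
    rw [pvStep, if_neg hm]

theorem pvSplit_append_semi (xs ys : List Char) :
    pvSplit (xs ++ ';' :: ys) = pvSplit xs ++ pvSplit ys := by
  induction xs with
  | nil => simp [pvSplit]
  | cons c t ih =>
    by_cases hc : c = ';'
    · subst hc; simp [pvSplit, ih]
    · simp only [List.cons_append, pvSplit, if_neg hc, ih]
      cases hr : pvSplit t with
      | nil => exact absurd hr (pvSplit_ne_nil t)
      | cons a u => simp

theorem foldl_pvStep_semis (ts : List Char) (h : ∀ c ∈ ts, c = ';')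
    (d : PySem.Dict String String) : (pvSplit ts).foldl pvStep d = d := by
  induction ts with
  | nil => simp [pvSplit, pvStep]
  | cons c t ih =>
    have hc : c = ';' := h c (by simp)
    subst hc
    simp only [pvSplit]
    exact ih (fun c hc => h c (by simp [hc]))

theorem foldl_pvStep_lead (ls core : List Char) (h : ∀ c ∈ ls, c = ';')
    (d : PySem.Dict String String) :
    (pvSplit (ls ++ core)).foldl pvStep d = (pvSplit core).foldl pvStep d := by
  induction ls with
  | nil => simp
  | cons c t ih =>
    have hc : c = ';' := h c (by simp)
    subst hc
    simp only [List.cons_append, pvSplit]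
    exact ih (fun c hc => h c (by simp [hc]))

theorem foldl_pvStep_trail (xs ts : List Char) (h : ∀ c ∈ ts, c = ';')
    (d : PySem.Dict String String) :
    (pvSplit (xs ++ ts)).foldl pvStep d = (pvSplit xs).foldl pvStep d := by
  cases ts with
  | nil => simp
  | cons c t =>
    have hc : c = ';' := h c (by simp)
    subst hc
    rw [pvSplit_append_semi, List.foldl_append]
    exact foldl_pvStep_semis t (fun c hc => h c (by simp [hc])) _

theorem foldl_pvStep_strip (cs : List Char) (d : PySem.Dict String String) :
    (pvSplit (PySem.Chars.stripChars cs [';'])).foldl pvStep d = (pvSplit cs).foldl pvStep d := by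
  rw [PySem.Chars.stripChars]
  set p : Char → Bool := fun c => [';'].contains c with hp
  have hmem : ∀ (l : List Char) (c : Char), c ∈ l.takeWhile p → c = ';' := by
    intro l c hcm
    have hpc : p c = true := List.mem_takeWhile_imp hcm
    simpa [hp] using hpc
  have hsplit : ∀ (l : List Char), l = l.takeWhile p ++ l.dropWhile p :=
    fun l => (List.takeWhile_append_dropWhile ..).symm
  -- peel leading run, then trailing run (via reverse)
  conv_rhs => rw [hsplit cs]
  rw [foldl_pvStep_lead _ _ (fun c hc => hmem cs c hc)]
  set m := cs.dropWhile p with hm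
  have hmr : m = (m.reverse.dropWhile p).reverse ++ (m.reverse.takeWhile p).reverse := by
    have h2 := congrArg List.reverse (hsplit m.reverse)
    rw [List.reverse_reverse, List.reverse_append] at h2
    exact h2
  conv_rhs => rw [hmr]
  rw [foldl_pvStep_trail _ _ (fun c hc => hmem m.reverse c (by simpa using hc))]

theorem parse_A_eq (comment : String) :
    parse_comment_line comment = ((pvSplit comment.toList).foldl pvStep (PySem.Dict.mk [])).items := by
  rw [parse_comment_line]
  rw [PySem.Str.split?]
  rw [PySem.Chars.split?, if_neg (by decide)]
  have h1 : (";" : String).toList = [';'] := rfl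
  have h2 : (PySem.Str.stripChars comment ";").toList
      = PySem.Chars.stripChars comment.toList [';'] := by
    simp [PySem.Str.stripChars]
  simp only [h1, h2, Option.map_some, Option.getD_some, splitOn_eq_pvSplit]
  rw [List.foldl_map]
  have hc : ∀ (l : List (List Char)) (d : PySem.Dict String String),
      List.foldl (fun (d : PySem.Dict String String) seg =>
        match PySem.Str.splitMax? (String.ofList seg) ":" 1 with
        | some [key, value] => d.insert (PySem.Str.strip key) (PySem.Str.strip value)
        | _ => d) d l = List.foldl pvStep d l := by
    intro l
    induction l with
    | nil => intro d; rfl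
    | cons a t _ =>
      intro d
      simp only [List.foldl_cons, afold_eq_pvStep]
  rw [hc, foldl_pvStep_strip]

theorem altLoop_seen (seg : List Char) (hs : ';' ∉ seg) :
    ∀ (rest key value : List Char) (d : PySem.Dict String String),
    pvAltLoop (seg ++ ';' :: rest) key value true d
      = pvAltLoop rest [] [] false
          (d.insert (String.ofList (PySem.Chars.strip key)) (String.ofList (PySem.Chars.strip (value ++ seg)))) := by
  induction seg with
  | nil =>
    intro rest key value d
    rw [List.nil_append, pvAltLoop]
    simp
  | cons c t ih =>
    intro rest key value d
    simp only [List.mem_cons, not_or] at hs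
    have hc : ¬ c = ';' := fun hcc => hs.1 hcc.symm
    rw [List.cons_append, pvAltLoop]
    simp only [if_neg hc]
    have hcol : ¬ (c = ':' ∧ (true : Bool) = false) := fun h => by simp at h
    rw [if_neg hcol]
    simp only [if_true]
    rw [ih (fun hm => hs.2 hm) rest key (value ++ [c]) d]
    simp

theorem altLoop_unseen (seg : List Char) (hs : ';' ∉ seg) :
    ∀ (rest key : List Char) (d : PySem.Dict String String),
    pvAltLoop (seg ++ ';' :: rest) key [] false d
      = pvAltLoop rest [] [] false
          (if ':' ∈ seg then
            d.insert (String.ofList (PySem.Chars.strip (key ++ seg.takeWhile (· ≠ ':'))))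
                     (String.ofList (PySem.Chars.strip ((seg.dropWhile (· ≠ ':')).drop 1)))
          else d) := by
  induction seg with
  | nil =>
    intro rest key d
    rw [List.nil_append, pvAltLoop]
    simp
  | cons c t ih =>
    intro rest key d
    simp only [List.mem_cons, not_or] at hs
    have hc : ¬ c = ';' := fun hcc => hs.1 hcc.symm
    rw [List.cons_append, pvAltLoop]
    simp only [if_neg hc]
    by_cases hcol : c = ':'
    · subst hcol
      rw [if_pos (show (':' : Char) = ':' ∧ True from ⟨rfl, trivial⟩)]
      rw [altLoop_seen t (fun hm => hs.2 hm) rest key [] d]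
      have hm : ':' ∈ (':' :: t) := by simp
      simp [hm, List.dropWhile]
    · simp only [hcol, false_and, if_false, Bool.false_eq_true]
      rw [ih (fun hm => hs.2 hm) rest (key ++ [c]) d]
      have hcs : (· ≠ ':') c = true := by simp [hcol]
      by_cases hm : ':' ∈ t
      · have hm2 : ':' ∈ (c :: t) := by simp [hm]
        simp [hm, hm2, hcol]
      · have hm2 : (':' ∈ (c :: t)) = False := by
          simp [hm]; exact fun h => hcol h.symm
        simp [hm, hm2]

theorem pvSplit_no_semi (l : List Char) (h : ';' ∉ l) : pvSplit l = [l] := by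
  induction l with
  | nil => rfl
  | cons c r ih =>
    simp only [List.mem_cons, not_or] at h
    have hc : ¬ c = ';' := fun hcc => h.1 hcc.symm
    simp [pvSplit, hc, ih h.2]

theorem semi_decomp (cs : List Char) (h : ';' ∈ cs) :
    cs = cs.takeWhile (· ≠ ';') ++ ';' :: (cs.dropWhile (· ≠ ';')).tail := by
  induction cs with
  | nil => simp at h
  | cons c r ih =>
    by_cases hc : c = ';'
    · subst hc; simp
    · have hr : ';' ∈ r := by
        rcases List.mem_cons.mp h with h1 | h1
        · exact absurd h1.symm hc
        · exact h1
      have hcs : decide (c ≠ ';') = true := by simp [hc]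
      simp only [List.takeWhile_cons, List.dropWhile_cons, hcs, if_true, List.cons_append]
      exact congrArg (c :: ·) (ih hr)

theorem takeWhile_no_semi (cs : List Char) : ';' ∉ cs.takeWhile (· ≠ ';') := by
  intro hm
  have := List.mem_takeWhile_imp hm
  simp at this

theorem altLoop_eq_fold (cs : List Char) (d : PySem.Dict String String) :
    pvAltLoop (cs ++ [';']) [] [] false d = (pvSplit cs).foldl pvStep d := by
  by_cases hsem : ';' ∈ cs
  · obtain ⟨a, r, hcs, ha⟩ : ∃ a r, cs = a ++ ';' :: r ∧ ';' ∉ a :=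
      ⟨cs.takeWhile (· ≠ ';'), (cs.dropWhile (· ≠ ';')).tail, semi_decomp cs hsem,
        takeWhile_no_semi cs⟩
    subst hcs
    rw [List.append_assoc, List.cons_append]
    rw [altLoop_unseen a ha]
    rw [pvSplit_append_semi, List.foldl_append, pvSplit_no_semi a ha]
    rw [altLoop_eq_fold r]
    simp [pvStep]
  · rw [altLoop_unseen cs hsem, pvAltLoop]
    rw [pvSplit_no_semi cs hsem]
    simp [pvStep]
termination_by cs.length
decreasing_by
  simp [hcs]
  omega

-- ===== VERDICT (by name: the statement is the Claim_ definition above) =====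
theorem parse_comment_line_spec : Claim_equal_parse_comment_line := by
  intro comment _
  show parse_comment_line comment = parse_comment_line_alt comment
  rw [parse_A_eq, parse_comment_line_alt, altLoop_eq_fold]
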